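-- pv_equiv track=rewrite | github.com/adhwaith127/sil | test/api(final).py | get_all_subordinates
-- ===== SOURCE A (Python) =====
-- def get_all_subordinates(manager_id, hierarchy_map):
--     all_subs = set()
--     queue = hierarchy_map.get(manager_id, [])
--
--     visited = set(queue)
--     all_subs.update(queue)
--
--     while queue:  #moves one by one.pops first(removes and store).check subs and appends them to end.
--         current_manager = queue.pop(0)  # always removing first.so not actually same item always
--         direct_reports = hierarchy_map.get(current_manager, [])
--         for report in direct_reports:
--             if report not in visited:
--                 visited.add(report)
--                 all_subs.add(report)
--                 queue.append(report)
--     return list(all_subs)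
-- ===== SOURCE B (Python) =====
-- def get_all_subordinates(manager_id, hierarchy_map):
--     # Recursive depth-first traversal with one shared visited set; the output is
--     # emitted in ascending order (A returns list(set), whose order is unspecified).
--     visited = set()
--
--     def visit(node):
--         for report in hierarchy_map.get(node, []):
--             if report not in visited:
--                 visited.add(report)
--                 visit(report)
--
--     visit(manager_id)
--     return sorted(visited)
-- ===== Notes on version B (the rewrite author's own statement) =====
-- stated objective: alternative
-- what changed: Replaced iterative BFS (FIFO queue with pop(0), a set(queue) seeding pre-pass, and separate visited/all_subs sets returned as list(set) in arbitrary set order) by recursive depth-first traversal with a single shared visited set, emitting the result in ascending sorted order (the return value is a set, so order carries no information); B also does not mutate hierarchy_map[manager_id] in place.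
import Mathlib
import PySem

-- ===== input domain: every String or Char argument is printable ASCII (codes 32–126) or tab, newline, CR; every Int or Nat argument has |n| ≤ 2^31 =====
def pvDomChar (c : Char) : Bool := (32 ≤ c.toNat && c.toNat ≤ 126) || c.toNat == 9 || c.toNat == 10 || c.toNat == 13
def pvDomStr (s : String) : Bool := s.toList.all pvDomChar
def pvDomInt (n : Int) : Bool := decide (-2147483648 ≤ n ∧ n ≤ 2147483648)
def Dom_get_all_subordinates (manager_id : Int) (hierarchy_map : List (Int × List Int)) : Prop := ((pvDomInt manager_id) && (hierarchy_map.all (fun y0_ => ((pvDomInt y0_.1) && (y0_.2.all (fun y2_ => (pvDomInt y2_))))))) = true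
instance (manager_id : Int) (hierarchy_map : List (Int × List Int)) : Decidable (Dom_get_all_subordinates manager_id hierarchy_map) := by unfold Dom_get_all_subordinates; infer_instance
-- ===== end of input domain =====

-- B replaces A's FIFO-queue BFS by recursive depth-first traversal with one shared visited set; both
-- return a Python SET as a list (list(set) / sorted(set)), whose iteration order is not modelled by
-- PySem, so both ports render that set in ascending order. Return-value equivalence only: A empties and
-- refills the list hierarchy_map[manager_id] in place (queue aliases it), B performs no mutation.

-- hierarchy_map.get(k, []) (both Pythons use it)
def pvGet (hm : List (Int × List Int)) (k : Int) : List Int :=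
  PySem.Dict.getD ⟨hm⟩ k []

-- every int occurring as a direct report anywhere in the map (termination bookkeeping only)
def pvValues (hm : List (Int × List Int)) : List Int := hm.flatMap (fun p => p.2)

def pvRemaining (hm : List (Int × List Int)) (v : List Int) : Nat :=
  ((pvValues hm).filter (fun x => !(PySem.Set.contains v x))).length

def pvMeasure (hm : List (Int × List Int)) (v q : List Int) : Nat :=
  2 * pvRemaining hm v + q.length

-- ===== PORT A =====
-- A's inner if-block: `if report not in visited: visited.add(...); all_subs.add(...); queue.append(...)`
-- state = (visited, all_subs, queue)
def pvStep (st : List Int × List Int × List Int) (r : Int) : List Int × List Int × List Int :=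
  if PySem.Set.contains st.1 r then st
  else (PySem.Set.add st.1 r, PySem.Set.add st.2.1 r, st.2.2 ++ [r])

theorem pvRemaining_add_lt (hm : List (Int × List Int)) {r : Int} (hr : r ∈ pvValues hm)
    {v : List Int} (hv : ¬ PySem.Set.contains v r = true) :
    pvRemaining hm (PySem.Set.add v r) < pvRemaining hm v := by
  unfold pvRemaining
  have hmem : r ∈ (pvValues hm).filter (fun x => !(PySem.Set.contains v x)) := by
    simp only [List.mem_filter]
    exact ⟨hr, by simpa using hv⟩
  calc ((pvValues hm).filter (fun x => !(PySem.Set.contains (PySem.Set.add v r) x))).length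
      = (((pvValues hm).filter (fun x => !(PySem.Set.contains v x))).filter
          (fun x => !(x == r))).length := by
        rw [List.filter_filter]
        apply congrArg
        apply List.filter_congr
        intro x _
        have hrv : r ∉ v := by simpa [PySem.Set.contains] using hv
        simp only [PySem.Set.add, PySem.Set.contains]
        by_cases hx : x = r <;> by_cases hmm : x ∈ v <;> simp_all
    _ < ((pvValues hm).filter (fun x => !(PySem.Set.contains v x))).length := by
        apply List.length_filter_lt_length_iff_exists.mpr
        exact ⟨r, hmem, by simp⟩

theorem pvStep_measure_le (hm : List (Int × List Int)) {r : Int} (hr : r ∈ pvValues hm)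
    (st : List Int × List Int × List Int) :
    pvMeasure hm (pvStep st r).1 (pvStep st r).2.2 ≤ pvMeasure hm st.1 st.2.2 := by
  unfold pvStep
  split
  · exact le_refl _
  · rename_i hc
    have hlt := pvRemaining_add_lt hm hr (v := st.1) hc
    simp only [pvMeasure, List.length_append, List.length_singleton]
    omega

theorem pvFold_measure_le (hm : List (Int × List Int)) {l : List Int}
    (hl : ∀ r ∈ l, r ∈ pvValues hm) (st : List Int × List Int × List Int) :
    pvMeasure hm (l.foldl pvStep st).1 (l.foldl pvStep st).2.2 ≤ pvMeasure hm st.1 st.2.2 := by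
  induction l generalizing st with
  | nil => exact le_refl _
  | cons r l ih =>
    simp only [List.foldl_cons]
    exact le_trans (ih (fun x hx => hl x (by simp [hx])) _)
      (pvStep_measure_le hm (hl r (by simp)) st)

theorem pvGet_subset (hm : List (Int × List Int)) (x : Int) :
    ∀ r ∈ pvGet hm x, r ∈ pvValues hm := by
  intro r hr
  simp only [pvGet, PySem.Dict.getD, PySem.Dict.get?] at hr
  simp only [pvValues, List.mem_flatMap]
  cases hfind : List.find? (fun p => p.1 == x) (PySem.Dict.items ⟨hm⟩) with
  | none => rw [hfind] at hr; simp at hr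
  | some p =>
    rw [hfind] at hr
    exact ⟨p, List.mem_of_find?_eq_some hfind, hr⟩

-- A's while loop: pop the first queue element, fold its direct reports through the if-block
def pvALoop (hm : List (Int × List Int)) (queue visited allSubs : List Int) : List Int :=
  match queue with
  | [] => allSubs
  | cur :: rest =>
    let st := (pvGet hm cur).foldl pvStep (visited, allSubs, rest)
    pvALoop hm st.2.2 st.1 st.2.1
termination_by pvMeasure hm visited queue
decreasing_by
  have h := pvFold_measure_le hm (pvGet_subset hm cur) (visited, allSubs, rest)
  simp only [pvMeasure, List.length_cons] at *
  omega

-- list(all_subs): all_subs is a Python set, whose iteration order PySem does not model;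
-- the set is rendered in ascending order (the result is compared as a set).
def get_all_subordinates (manager_id : Int) (hierarchy_map : List (Int × List Int)) : List Int :=
  let queue := pvGet hierarchy_map manager_id
  let visited := PySem.Set.ofList queue
  let allSubs := PySem.Set.update PySem.Set.empty queue
  PySem.List.sorted (pvALoop hierarchy_map queue visited allSubs) (fun x => x) false

-- ===== PORT B =====
-- B's recursive visit: `for report in hierarchy_map.get(node, []): if report not in visited:
-- visited.add(report); visit(report)`; pvVisit hm f v rs runs that for-loop body on the report
-- list rs with visited set v; the fuel f only makes the recursion total (shown sufficient below).
def pvVisit (hm : List (Int × List Int)) (f : Nat) (v : List Int) (rs : List Int) : List Int :=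
  match rs with
  | [] => v
  | r :: rest =>
    if PySem.Set.contains v r then pvVisit hm f v rest
    else
      match f with
      | 0 => v
      | f' + 1 => pvVisit hm (f' + 1) (pvVisit hm f' (PySem.Set.add v r) (pvGet hm r)) rest
termination_by (f, rs.length)

def get_all_subordinates_alt (manager_id : Int) (hierarchy_map : List (Int × List Int)) : List Int :=
  PySem.List.sorted
    (pvVisit hierarchy_map ((pvValues hierarchy_map).length + 1) PySem.Set.empty
      (pvGet hierarchy_map manager_id))
    (fun x => x) false

-- ===== PRECONDITION & SPEC =====
def Spec_get_all_subordinates (manager_id : Int) (hierarchy_map : List (Int × List Int)) (out : List Int) : Prop := out = get_all_subordinates_alt manager_id hierarchy_map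
instance (manager_id : Int) (hierarchy_map : List (Int × List Int)) (out : List Int) : Decidable (Spec_get_all_subordinates manager_id hierarchy_map out) := by unfold Spec_get_all_subordinates; infer_instance

-- ===== CLAIM (what is proved, stated in full; the proofs are below) =====
def Claim_equal_get_all_subordinates : Prop := ∀ (manager_id : Int) (hierarchy_map : List (Int × List Int)), Dom_get_all_subordinates manager_id hierarchy_map → Spec_get_all_subordinates manager_id hierarchy_map (get_all_subordinates manager_id hierarchy_map)

-- ===== LEMMAS AND PROOFS =====

-- the edge relation of the hierarchy and reachability (≥ 1 step out of the manager)
def pvEdge (hm : List (Int × List Int)) (a b : Int) : Prop := b ∈ pvGet hm a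

def pvReach (hm : List (Int × List Int)) (m x : Int) : Prop :=
  ∃ z, z ∈ pvGet hm m ∧ Relation.ReflTransGen (pvEdge hm) z x

theorem pvReach_of_child {hm : List (Int × List Int)} {m z : Int} (h : z ∈ pvGet hm m) :
    pvReach hm m z := ⟨z, h, Relation.ReflTransGen.refl⟩

theorem pvReach_tail {hm : List (Int × List Int)} {m a b : Int} (h : pvReach hm m a)
    (e : pvEdge hm a b) : pvReach hm m b := by
  obtain ⟨z, hz, hr⟩ := h
  exact ⟨z, hz, hr.tail e⟩

-- ---- fold (A's inner for-loop) facts ----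
theorem pvFold_mono (l : List Int) (st : List Int × List Int × List Int) {x : Int}
    (hx : x ∈ st.1) : x ∈ (l.foldl pvStep st).1 := by
  induction l generalizing st with
  | nil => exact hx
  | cons r l ih =>
    apply ih
    simp only [pvStep]
    split
    · exact hx
    · simp [PySem.Set.mem_add, hx]

theorem pvFold_saturate (l : List Int) (st : List Int × List Int × List Int) {r : Int}
    (hr : r ∈ l) : r ∈ (l.foldl pvStep st).1 := by
  induction l generalizing st with
  | nil => cases hr
  | cons a l ih =>
    rcases List.mem_cons.mp hr with h | h
    · subst h
      simp only [List.foldl_cons]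
      apply pvFold_mono
      simp only [pvStep]
      split
      · rename_i hc
        simpa [PySem.Set.contains] using hc
      · simp [PySem.Set.mem_add]
    · exact ih _ h

-- elements of the folded visited set come from the old one or from the folded list
theorem pvFold_fst_mem (l : List Int) (st : List Int × List Int × List Int) {x : Int}
    (hx : x ∈ (l.foldl pvStep st).1) : x ∈ st.1 ∨ x ∈ l := by
  induction l generalizing st with
  | nil => exact Or.inl hx
  | cons r l ih =>
    simp only [List.foldl_cons] at hx
    rcases ih _ hx with h | h
    · simp only [pvStep] at h
      split at h
      · exact Or.inl h
      · rcases (PySem.Set.mem_add _ _ _).mp h with h | h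
        · exact Or.inl h
        · exact Or.inr (by simp [h])
    · exact Or.inr (by simp [h])

-- the queue only grows along the fold
theorem pvFold_queue_mono (l : List Int) (st : List Int × List Int × List Int) {y : Int}
    (hy : y ∈ st.2.2) : y ∈ (l.foldl pvStep st).2.2 := by
  induction l generalizing st with
  | nil => exact hy
  | cons r l ih =>
    apply ih
    simp only [pvStep]
    split
    · exact hy
    · simp [hy]

-- queue ⊆ visited is preserved by the fold
theorem pvFold_queue_sub (l : List Int) (st : List Int × List Int × List Int)
    (h : ∀ y ∈ st.2.2, y ∈ st.1) :
    ∀ y ∈ (l.foldl pvStep st).2.2, y ∈ (l.foldl pvStep st).1 := by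
  induction l generalizing st with
  | nil => exact h
  | cons r l ih =>
    apply ih
    intro y hy
    simp only [pvStep]
    simp only [pvStep] at hy
    split at hy <;> split
    · exact h y hy
    · simp_all
    · simp_all
    · rename_i hc _
      rcases List.mem_append.mp hy with h' | h'
      · simp [PySem.Set.mem_add, h y h']
      · simp only [List.mem_singleton] at h'
        simp [PySem.Set.mem_add, h']

-- an element newly visited by the fold was appended to the queue
theorem pvFold_new_in_queue (l : List Int) (st : List Int × List Int × List Int) {x : Int}
    (hx : x ∈ (l.foldl pvStep st).1) : x ∈ st.1 ∨ x ∈ (l.foldl pvStep st).2.2 := by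
  induction l generalizing st with
  | nil => exact Or.inl hx
  | cons r l ih =>
    simp only [List.foldl_cons] at hx ⊢
    rcases ih _ hx with h | h
    · simp only [pvStep] at h
      split at h
      · exact Or.inl h
      · rcases (PySem.Set.mem_add _ _ _).mp h with h' | h'
        · exact Or.inl h'
        · subst h'
          refine Or.inr (pvFold_queue_mono _ _ ?_)
          simp [pvStep]
          split
          · simp_all
          · simp
    · exact Or.inr h

-- the visited and all_subs components stay equal (A adds to both together)
theorem pvFold_diagKeep (l : List Int) (st : List Int × List Int × List Int)
    (h : st.1 = st.2.1) : (l.foldl pvStep st).1 = (l.foldl pvStep st).2.1 := by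
  induction l generalizing st with
  | nil => exact h
  | cons r l ih =>
    apply ih
    simp only [pvStep]
    split
    · exact h
    · simp [h]

theorem pvFold_nodup (l : List Int) (st : List Int × List Int × List Int)
    (h : st.1.Nodup) : (l.foldl pvStep st).1.Nodup := by
  induction l generalizing st with
  | nil => exact h
  | cons r l ih =>
    apply ih
    simp only [pvStep]
    split
    · exact h
    · exact PySem.Set.nodup_add _ _ h

-- ---- A's loop, by strong induction on the BFS measure ----
-- visited is carried into the result (allSubs = visited throughout)
theorem pvALoop_mono (hm : List (Int × List Int)) :
    ∀ (N : Nat) (q v s : List Int), pvMeasure hm v q ≤ N → s = v →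
      ∀ x ∈ v, x ∈ pvALoop hm q v s := by
  intro N
  induction N using Nat.strong_induction_on with
  | _ N ih =>
    intro q v s hN hsv x hx
    cases q with
    | nil => rw [pvALoop]; exact hsv ▸ hx
    | cons c r =>
      rw [pvALoop]
      have hle := pvFold_measure_le hm (pvGet_subset hm c) (v, s, r)
      have hlt : pvMeasure hm ((pvGet hm c).foldl pvStep (v, s, r)).1
          ((pvGet hm c).foldl pvStep (v, s, r)).2.2 < N := by
        simp only [pvMeasure, List.length_cons] at *
        omega
      exact ih _ hlt _ _ _ le_rfl (pvFold_diagKeep _ _ (by simp [hsv])).symm _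
        (pvFold_mono _ _ hx)

theorem pvALoop_nodup (hm : List (Int × List Int)) :
    ∀ (N : Nat) (q v s : List Int), pvMeasure hm v q ≤ N → s = v → v.Nodup →
      (pvALoop hm q v s).Nodup := by
  intro N
  induction N using Nat.strong_induction_on with
  | _ N ih =>
    intro q v s hN hsv hnd
    cases q with
    | nil => rw [pvALoop]; exact hsv ▸ hnd
    | cons c r =>
      rw [pvALoop]
      have hle := pvFold_measure_le hm (pvGet_subset hm c) (v, s, r)
      have hlt : pvMeasure hm ((pvGet hm c).foldl pvStep (v, s, r)).1
          ((pvGet hm c).foldl pvStep (v, s, r)).2.2 < N := by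
        simp only [pvMeasure, List.length_cons] at *
        omega
      exact ih _ hlt _ _ _ le_rfl (pvFold_diagKeep _ _ (by simp [hsv])).symm
        (pvFold_nodup _ _ hnd)

-- soundness: every collected element satisfies any edge-closed predicate holding on visited
theorem pvALoop_sound (hm : List (Int × List Int)) {P : Int → Prop}
    (hP : ∀ a b, P a → pvEdge hm a b → P b) :
    ∀ (N : Nat) (q v s : List Int), pvMeasure hm v q ≤ N → s = v →
      (∀ x ∈ q, x ∈ v) → (∀ x ∈ v, P x) →
      ∀ x ∈ pvALoop hm q v s, P x := by
  intro N
  induction N using Nat.strong_induction_on with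
  | _ N ih =>
    intro q v s hN hsv hqv hvP x hx
    cases q with
    | nil => rw [pvALoop] at hx; exact hvP x (hsv ▸ hx)
    | cons c r =>
      rw [pvALoop] at hx
      have hle := pvFold_measure_le hm (pvGet_subset hm c) (v, s, r)
      have hlt : pvMeasure hm ((pvGet hm c).foldl pvStep (v, s, r)).1
          ((pvGet hm c).foldl pvStep (v, s, r)).2.2 < N := by
        simp only [pvMeasure, List.length_cons] at *
        omega
      refine ih _ hlt _ _ _ le_rfl (pvFold_diagKeep _ _ (by simp [hsv])).symm
        (pvFold_queue_sub _ _ ?_) ?_ x hx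
      · intro y hy
        exact hqv y (by simp [hy])
      · intro y hy
        rcases pvFold_fst_mem _ _ hy with h | h
        · exact hvP y h
        · exact hP c y (hvP c (hqv c (by simp))) h

-- completeness: with the invariant "every visited node is queued or has all children visited",
-- the result is closed under edges
theorem pvALoop_closed (hm : List (Int × List Int)) :
    ∀ (N : Nat) (q v s : List Int), pvMeasure hm v q ≤ N → s = v →
      (∀ x ∈ q, x ∈ v) →
      (∀ x ∈ v, x ∈ q ∨ ∀ y ∈ pvGet hm x, y ∈ v) →
      ∀ x ∈ pvALoop hm q v s, ∀ y ∈ pvGet hm x, y ∈ pvALoop hm q v s := by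
  intro N
  induction N using Nat.strong_induction_on with
  | _ N ih =>
    intro q v s hN hsv hqv hinv x hx y hy
    cases q with
    | nil =>
      rw [pvALoop] at hx ⊢
      rcases hinv x (hsv ▸ hx) with h | h
      · cases h
      · exact hsv ▸ h y hy
    | cons c r =>
      rw [pvALoop] at hx ⊢
      have hle := pvFold_measure_le hm (pvGet_subset hm c) (v, s, r)
      have hlt : pvMeasure hm ((pvGet hm c).foldl pvStep (v, s, r)).1
          ((pvGet hm c).foldl pvStep (v, s, r)).2.2 < N := by
        simp only [pvMeasure, List.length_cons] at *
        omega
      refine ih _ hlt _ _ _ le_rfl (pvFold_diagKeep _ _ (by simp [hsv])).symm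
        (pvFold_queue_sub _ _ (fun z hz => hqv z (by simp [hz]))) ?_ x hx y hy
      intro z hz
      rcases pvFold_new_in_queue _ _ hz with hzv | hzq
      · rcases hinv z hzv with hzq' | hcl
        · rcases List.mem_cons.mp hzq' with h | h
          · subst h
            exact Or.inr (fun w hw => pvFold_saturate _ _ hw)
          · exact Or.inl (pvFold_queue_mono _ _ h)
        · exact Or.inr (fun w hw => pvFold_mono _ _ (hcl w hw))
      · exact Or.inl hzq

-- ---- B's recursion facts ----
-- unfolding equations of pvVisit (its match makes `rw [pvVisit]` unavailable)
theorem pvVisit_nil (hm : List (Int × List Int)) (f : Nat) (v : List Int) :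
    pvVisit hm f v [] = v := by rw [pvVisit.eq_def]

theorem pvVisit_cons_mem (hm : List (Int × List Int)) (f : Nat) (v : List Int) {r : Int}
    (rest : List Int) (hc : PySem.Set.contains v r = true) :
    pvVisit hm f v (r :: rest) = pvVisit hm f v rest := by
  rw [pvVisit.eq_def]; exact if_pos hc

theorem pvVisit_cons_zero (hm : List (Int × List Int)) (v : List Int) {r : Int}
    (rest : List Int) (hc : ¬ PySem.Set.contains v r = true) :
    pvVisit hm 0 v (r :: rest) = v := by
  rw [pvVisit.eq_def]; exact if_neg hc

theorem pvVisit_cons_new (hm : List (Int × List Int)) (f' : Nat) (v : List Int) {r : Int}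
    (rest : List Int) (hc : ¬ PySem.Set.contains v r = true) :
    pvVisit hm (f' + 1) v (r :: rest)
      = pvVisit hm (f' + 1) (pvVisit hm f' (PySem.Set.add v r) (pvGet hm r)) rest := by
  rw [pvVisit.eq_def]; exact if_neg hc

theorem pvVisit_mono (hm : List (Int × List Int)) (f : Nat) (v rs : List Int) :
    ∀ x ∈ v, x ∈ pvVisit hm f v rs := by
  induction f, v, rs using pvVisit.induct hm with
  | case1 f v => intro x hx; rw [pvVisit_nil]; exact hx
  | case2 f v r rest hc ih =>
    intro x hx; rw [pvVisit_cons_mem hm f v rest hc]; exact ih x hx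
  | case3 v r rest hc =>
    intro x hx; rw [pvVisit_cons_zero hm v rest hc]; exact hx
  | case4 v r rest hc f' ih1 ih2 =>
    intro x hx
    rw [pvVisit_cons_new hm f' v rest hc]
    exact ih2 x (ih1 x ((PySem.Set.mem_add _ _ _).mpr (Or.inl hx)))

theorem pvVisit_nodup (hm : List (Int × List Int)) (f : Nat) (v rs : List Int)
    (h : v.Nodup) : (pvVisit hm f v rs).Nodup := by
  induction f, v, rs using pvVisit.induct hm with
  | case1 f v => rw [pvVisit_nil]; exact h
  | case2 f v r rest hc ih => rw [pvVisit_cons_mem hm f v rest hc]; exact ih h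
  | case3 v r rest hc => rw [pvVisit_cons_zero hm v rest hc]; exact h
  | case4 v r rest hc f' ih1 ih2 =>
    rw [pvVisit_cons_new hm f' v rest hc]
    exact ih2 (ih1 (PySem.Set.nodup_add _ _ h))

theorem pvVisit_sound (hm : List (Int × List Int)) {P : Int → Prop}
    (hP : ∀ a b, P a → pvEdge hm a b → P b) (f : Nat) (v rs : List Int) :
    (∀ x ∈ v, P x) → (∀ r ∈ rs, P r) → ∀ x ∈ pvVisit hm f v rs, P x := by
  induction f, v, rs using pvVisit.induct hm with
  | case1 f v =>
    intro hv _ x hx; rw [pvVisit_nil] at hx; exact hv x hx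
  | case2 f v r rest hc ih =>
    intro hv hrs x hx
    rw [pvVisit_cons_mem hm f v rest hc] at hx
    exact ih hv (fun z hz => hrs z (by simp [hz])) x hx
  | case3 v r rest hc =>
    intro hv _ x hx
    rw [pvVisit_cons_zero hm v rest hc] at hx
    exact hv x hx
  | case4 v r rest hc f' ih1 ih2 =>
    intro hv hrs x hx
    rw [pvVisit_cons_new hm f' v rest hc] at hx
    have hPr : P r := hrs r (by simp)
    have hv1 : ∀ x ∈ PySem.Set.add v r, P x := by
      intro z hz
      rcases (PySem.Set.mem_add _ _ _).mp hz with h | h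
      · exact hv z h
      · exact h ▸ hPr
    exact ih2 (ih1 hv1 (fun z hz => hP r z hPr hz)) (fun z hz => hrs z (by simp [hz])) x hx

-- subset monotonicity of the remaining count
theorem pvFilterLenMono {p q : Int → Bool} (l : List Int) (h : ∀ a, p a = true → q a = true) :
    (l.filter p).length ≤ (l.filter q).length := by
  induction l with
  | nil => exact le_refl _
  | cons a l ih =>
    simp only [List.filter_cons]
    cases hp : p a
    · cases hq : q a <;> simp <;> omega
    · rw [h a hp]
      simpa using ih

theorem pvRemaining_mono (hm : List (Int × List Int)) {v w : List Int}
    (h : ∀ x ∈ v, x ∈ w) : pvRemaining hm w ≤ pvRemaining hm v := by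
  unfold pvRemaining
  apply pvFilterLenMono
  intro a ha
  cases hv : PySem.Set.contains v a
  · simp
  · have hw : PySem.Set.contains w a = true :=
      (PySem.Set.contains_iff w a).mpr (h a ((PySem.Set.contains_iff v a).mp hv))
    rw [hw] at ha
    simp at ha

-- with sufficient fuel the result contains every processed report and is closed on new elements
theorem pvVisit_spec (hm : List (Int × List Int)) (f : Nat) (v rs : List Int) :
    pvRemaining hm v < f → (∀ r ∈ rs, r ∈ pvValues hm) →
      (∀ r ∈ rs, r ∈ pvVisit hm f v rs) ∧
      (∀ x ∈ pvVisit hm f v rs, x ∈ v ∨ ∀ y ∈ pvGet hm x, y ∈ pvVisit hm f v rs) := by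
  induction f, v, rs using pvVisit.induct hm with
  | case1 f v =>
    intro _ _
    rw [pvVisit_nil]
    exact ⟨by simp, fun x hx => Or.inl hx⟩
  | case2 f v r rest hc ih =>
    intro hf hrs
    have h := ih hf (fun z hz => hrs z (by simp [hz]))
    constructor
    · intro z hz
      rw [pvVisit_cons_mem hm f v rest hc]
      rcases List.mem_cons.mp hz with h' | h'
      · exact h' ▸ pvVisit_mono hm f v rest r ((PySem.Set.contains_iff _ _).mp hc)
      · exact h.1 z h'
    · intro x hx
      rw [pvVisit_cons_mem hm f v rest hc] at hx ⊢
      exact h.2 x hx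
  | case3 v r rest hc =>
    -- fuel 0: excluded by the fuel hypothesis (pvRemaining < 0 is impossible)
    intro hf hrs
    exact absurd hf (by omega)
  | case4 v r rest hc f' ih1 ih2 =>
    intro hf hrs
    have hrv : r ∈ pvValues hm := hrs r (by simp)
    have hlt : pvRemaining hm (PySem.Set.add v r) < pvRemaining hm v :=
      pvRemaining_add_lt hm hrv (by simpa using hc)
    have hf1 : pvRemaining hm (PySem.Set.add v r) < f' := by omega
    have h1 := ih1 hf1 (pvGet_subset hm r)
    have hsub1 : ∀ x ∈ PySem.Set.add v r, x ∈ pvVisit hm f' (PySem.Set.add v r) (pvGet hm r) :=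
      pvVisit_mono hm f' (PySem.Set.add v r) (pvGet hm r)
    have hf2 : pvRemaining hm (pvVisit hm f' (PySem.Set.add v r) (pvGet hm r)) < f' + 1 := by
      have h3 : ∀ x ∈ v, x ∈ pvVisit hm f' (PySem.Set.add v r) (pvGet hm r) :=
        fun x hx => hsub1 x ((PySem.Set.mem_add _ _ _).mpr (Or.inl hx))
      have := pvRemaining_mono hm h3
      omega
    have h2 := ih2 hf2 (fun z hz => hrs z (by simp [hz]))
    have hW1W : ∀ x ∈ pvVisit hm f' (PySem.Set.add v r) (pvGet hm r),
        x ∈ pvVisit hm (f' + 1) (pvVisit hm f' (PySem.Set.add v r) (pvGet hm r)) rest :=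
      pvVisit_mono hm (f' + 1) _ rest
    constructor
    · intro z hz
      rw [pvVisit_cons_new hm f' v rest hc]
      rcases List.mem_cons.mp hz with h' | h'
      · subst h'
        exact hW1W z (hsub1 z ((PySem.Set.mem_add _ _ _).mpr (Or.inr rfl)))
      · exact h2.1 z h'
    · intro x hx
      rw [pvVisit_cons_new hm f' v rest hc] at hx ⊢
      rcases h2.2 x hx with hx1 | hcl
      · rcases h1.2 x hx1 with hxa | hcl1
        · rcases (PySem.Set.mem_add _ _ _).mp hxa with h' | h'
          · exact Or.inl h'
          · subst h'
            exact Or.inr (fun y hy => hW1W y (h1.1 y hy))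
        · exact Or.inr (fun y hy => hW1W y (hcl1 y hy))
      · exact Or.inr hcl

-- ---- the two reachable sets coincide ----
theorem pvA_result_iff (hm : List (Int × List Int)) (m : Int) :
    ∀ x, x ∈ pvALoop hm (pvGet hm m) (PySem.Set.ofList (pvGet hm m))
        (PySem.Set.ofList (pvGet hm m)) ↔ pvReach hm m x := by
  intro x
  set q0 := pvGet hm m with hq0
  set v0 := PySem.Set.ofList q0 with hv0
  have hqv : ∀ z ∈ q0, z ∈ v0 := fun z hz => (PySem.Set.mem_ofList _ _).mpr hz
  have hvq : ∀ z ∈ v0, z ∈ q0 := fun z hz => (PySem.Set.mem_ofList _ _).mp hz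
  constructor
  · intro hx
    refine pvALoop_sound hm (P := pvReach hm m) (fun a b ha e => pvReach_tail ha e)
      (pvMeasure hm v0 q0) q0 v0 v0 le_rfl rfl hqv ?_ x hx
    intro z hz
    exact pvReach_of_child (hvq z hz)
  · rintro ⟨z, hz, hr⟩
    have hclosed := pvALoop_closed hm (pvMeasure hm v0 q0) q0 v0 v0 le_rfl rfl hqv
      (fun z hz => Or.inl (hvq z hz))
    have hz0 : z ∈ pvALoop hm q0 v0 v0 :=
      pvALoop_mono hm (pvMeasure hm v0 q0) q0 v0 v0 le_rfl rfl z (hqv z hz)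
    induction hr with
    | refl => exact hz0
    | tail _ e ih => exact hclosed _ ih _ e

theorem pvB_result_iff (hm : List (Int × List Int)) (m : Int) :
    ∀ x, x ∈ pvVisit hm ((pvValues hm).length + 1) PySem.Set.empty (pvGet hm m) ↔
      pvReach hm m x := by
  intro x
  have hfuel : pvRemaining hm PySem.Set.empty < (pvValues hm).length + 1 := by
    have : pvRemaining hm PySem.Set.empty ≤ (pvValues hm).length :=
      List.length_filter_le _ _
    omega
  have hspec := pvVisit_spec hm ((pvValues hm).length + 1) PySem.Set.empty (pvGet hm m)
    hfuel (pvGet_subset hm m)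
  constructor
  · intro hx
    refine pvVisit_sound hm (P := pvReach hm m) (fun a b ha e => pvReach_tail ha e)
      _ _ _ ?_ ?_ x hx
    · intro z hz; cases hz
    · intro z hz; exact pvReach_of_child hz
  · rintro ⟨z, hz, hr⟩
    have hz0 := hspec.1 z hz
    induction hr with
    | refl => exact hz0
    | tail _ e ih =>
      rcases hspec.2 _ ih with h | h
      · cases h
      · exact h _ e

-- ===== VERDICT (by name: the statement is the Claim_ definition above) =====
theorem get_all_subordinates_spec : Claim_equal_get_all_subordinates := by
  intro m hm _
  unfold Spec_get_all_subordinates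
  show PySem.List.sorted (pvALoop hm (pvGet hm m) (PySem.Set.ofList (pvGet hm m))
      (PySem.Set.update PySem.Set.empty (pvGet hm m))) (fun x => x) false
    = PySem.List.sorted (pvVisit hm ((pvValues hm).length + 1) PySem.Set.empty (pvGet hm m))
      (fun x => x) false
  have hupd : PySem.Set.update PySem.Set.empty (pvGet hm m)
      = PySem.Set.ofList (pvGet hm m) := rfl
  rw [hupd]
  apply PySem.List.sorted_eq_sorted_of_perm _ _ _ (fun a b h => h)
  have hA : (pvALoop hm (pvGet hm m) (PySem.Set.ofList (pvGet hm m))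
      (PySem.Set.ofList (pvGet hm m))).Nodup :=
    pvALoop_nodup hm _ _ _ _ le_rfl rfl (PySem.Set.nodup_ofList _)
  have hB : (pvVisit hm ((pvValues hm).length + 1) PySem.Set.empty (pvGet hm m)).Nodup :=
    pvVisit_nodup hm _ _ _ List.nodup_nil
  rw [List.perm_ext_iff_of_nodup hA hB]
  intro x
  rw [pvA_result_iff hm m x, pvB_result_iff hm m x]
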